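-- pv_equiv track=rewrite | github.com/LoxiasMegalos/Projeto_Python_Cadastros | cadastro_empresa.py | corrige_nome_empreendimento
-- ===== SOURCE A (Python) =====
-- def corrige_nome_empreendimento(nome):
--     tratando_nome = ""
--     nome_atualizado_30 = ""
--     nome_atualizado_20 = ""
--     nome_atualizado_25 = ""
--
--     for letra in nome.replace(".", "").replace("EMPREENDIMENTOS", "EMP").replace("IMOBILIARIOS", "IMOB").replace("COMERCIO", "COM").replace("CONSUMO", "CONS"):
--         tratando_nome = tratando_nome + letra
--         if letra == " ":
--             if (len(nome_atualizado_30) + len(tratando_nome) <= 30) and len(tratando_nome.strip()) > 1: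
--                 nome_atualizado_30 = nome_atualizado_30 + tratando_nome
--             if (len(nome_atualizado_25) + len(tratando_nome) <= 25 and len(tratando_nome.strip()) > 1):
--                 nome_atualizado_25 = nome_atualizado_25 + tratando_nome
--             if (len(nome_atualizado_20) + len(tratando_nome) <= 20 and len(tratando_nome.strip()) > 1):
--                 nome_atualizado_20 = nome_atualizado_20 + tratando_nome
--             tratando_nome = ""
--
--     if (len(nome_atualizado_30) + len(tratando_nome) <= 30):
--         nome_atualizado_30 = nome_atualizado_30 + tratando_nome
--     if (len(nome_atualizado_25) + len(tratando_nome) <= 25):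
--         nome_atualizado_25 = nome_atualizado_25 + tratando_nome
--     if (len(nome_atualizado_20) + len(tratando_nome) <= 20):
--         nome_atualizado_20 = nome_atualizado_20 + tratando_nome
--
--     return nome_atualizado_30, nome_atualizado_25, nome_atualizado_20
-- ===== SOURCE B (Python) =====
-- def _flush(buf, token, limit):
--     return buf + token if len(buf) + len(token) <= limit else buf
--
-- def corrige_nome_empreendimento(nome):
--     processed = nome.replace(".", "").replace("EMPREENDIMENTOS", "EMP").replace("IMOBILIARIOS", "IMOB").replace("COMERCIO", "COM").replace("CONSUMO", "CONS")
--     parts = processed.split(' ')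
--     b30 = b25 = b20 = ""
--     for part in parts[:-1]:
--         if len(part.strip()) > 1:
--             token = part + ' '
--             b30 = _flush(b30, token, 30)
--             b25 = _flush(b25, token, 25)
--             b20 = _flush(b20, token, 20)
--     last = parts[-1]
--     return _flush(b30, last, 30), _flush(b25, last, 25), _flush(b20, last, 20)
-- ===== Notes on version B (the rewrite author's own statement) =====
-- stated objective: faster
-- what changed: Tokenize-then-pack: split the preprocessed name on spaces once and pack each eligible word token into the three length-limited buffers via one shared flush helper, replacing A's char-by-char accumulator whose repeated per-character string concatenation is quadratic.
import Mathlib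
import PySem

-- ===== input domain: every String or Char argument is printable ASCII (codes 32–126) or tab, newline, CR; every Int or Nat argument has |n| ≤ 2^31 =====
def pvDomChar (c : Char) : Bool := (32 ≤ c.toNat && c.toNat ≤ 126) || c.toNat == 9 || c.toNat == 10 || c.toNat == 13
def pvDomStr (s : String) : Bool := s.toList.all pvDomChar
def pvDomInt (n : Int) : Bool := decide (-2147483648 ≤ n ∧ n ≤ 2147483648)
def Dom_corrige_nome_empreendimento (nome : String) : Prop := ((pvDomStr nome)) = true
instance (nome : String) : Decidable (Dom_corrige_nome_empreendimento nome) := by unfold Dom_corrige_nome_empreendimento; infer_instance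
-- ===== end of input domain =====

-- B replaces A's char-by-char accumulator (quadratic repeated string concatenation) by a split-once, pack-tokens pass; a timing run measured B faster.

-- the shared preprocessing chain of .replace calls (identical in both Pythons)
def pvPre (nome : String) : List Char :=
  PySem.Chars.replace (PySem.Chars.replace (PySem.Chars.replace (PySem.Chars.replace
    (PySem.Chars.replace nome.toList ".".toList "".toList)
    "EMPREENDIMENTOS".toList "EMP".toList) "IMOBILIARIOS".toList "IMOB".toList)
    "COMERCIO".toList "COM".toList) "CONSUMO".toList "CONS".toList

-- ===== PORT A =====
-- loop body of A: state = (tratando_nome, nome_atualizado_30, nome_atualizado_25, nome_atualizado_20)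
def pvStepA (st : List Char × List Char × List Char × List Char) (letra : Char) :
    List Char × List Char × List Char × List Char :=
  let trat := st.1 ++ [letra]
  if letra = ' ' then
    let b30 := if st.2.1.length + trat.length ≤ 30 ∧ 1 < (PySem.Chars.strip trat).length
               then st.2.1 ++ trat else st.2.1
    let b25 := if st.2.2.1.length + trat.length ≤ 25 ∧ 1 < (PySem.Chars.strip trat).length
               then st.2.2.1 ++ trat else st.2.2.1
    let b20 := if st.2.2.2.length + trat.length ≤ 20 ∧ 1 < (PySem.Chars.strip trat).length
               then st.2.2.2 ++ trat else st.2.2.2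
    ([], b30, b25, b20)
  else (trat, st.2)

def pvFinalA (st : List Char × List Char × List Char × List Char) : String × String × String :=
  let b30 := if st.2.1.length + st.1.length ≤ 30 then st.2.1 ++ st.1 else st.2.1
  let b25 := if st.2.2.1.length + st.1.length ≤ 25 then st.2.2.1 ++ st.1 else st.2.2.1
  let b20 := if st.2.2.2.length + st.1.length ≤ 20 then st.2.2.2 ++ st.1 else st.2.2.2
  (String.ofList b30, String.ofList b25, String.ofList b20)

def corrige_nome_empreendimento (nome : String) : String × String × String :=
  pvFinalA ((pvPre nome).foldl pvStepA ([], [], [], []))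

-- ===== PORT B =====
-- _flush of Source B
def pvFlush (buf token : List Char) (limit : Nat) : List Char :=
  if buf.length + token.length ≤ limit then buf ++ token else buf

-- loop body of Source B: state = (b30, b25, b20), one word part
def pvStepB (st : List Char × List Char × List Char) (part : List Char) :
    List Char × List Char × List Char :=
  if 1 < (PySem.Chars.strip part).length then
    let token := part ++ [' ']
    (pvFlush st.1 token 30, pvFlush st.2.1 token 25, pvFlush st.2.2 token 20)
  else st

def pvFinalB (parts : List (List Char)) : String × String × String :=
  let st := parts.dropLast.foldl pvStepB ([], [], [])
  let last := parts.getLastD []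
  (String.ofList (pvFlush st.1 last 30), String.ofList (pvFlush st.2.1 last 25),
   String.ofList (pvFlush st.2.2 last 20))

def corrige_nome_empreendimento_alt (nome : String) : String × String × String :=
  pvFinalB (PySem.Chars.splitOn (pvPre nome) [' '])

-- ===== PRECONDITION & SPEC =====
def Spec_corrige_nome_empreendimento (nome : String) (out : String × String × String) : Prop := out = corrige_nome_empreendimento_alt nome
instance (nome : String) (out : String × String × String) : Decidable (Spec_corrige_nome_empreendimento nome out) := by unfold Spec_corrige_nome_empreendimento; infer_instance

-- ===== CLAIM (what is proved, stated in full; the proofs are below) =====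
def Claim_equal_corrige_nome_empreendimento : Prop := ∀ (nome : String), Dom_corrige_nome_empreendimento nome → Spec_corrige_nome_empreendimento nome (corrige_nome_empreendimento nome)

-- ===== LEMMAS AND PROOFS =====

-- reference split on a single space, in structural-recursion form
def mySplit : List Char → List (List Char)
  | [] => [[]]
  | c :: rest =>
    if c = ' ' then [] :: mySplit rest
    else (c :: (mySplit rest).headD []) :: (mySplit rest).tail

lemma mySplit_ne_nil (cs : List Char) : mySplit cs ≠ [] := by
  cases cs with
  | nil => simp [mySplit]
  | cons c rest => by_cases h : c = ' ' <;> simp [mySplit, h]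

lemma splitOn_go_spec : ∀ (fuel : Nat) (l cur : List Char) (acc : List (List Char)),
    l.length < fuel →
    PySem.Chars.splitOn.go [' '] fuel l cur acc =
      acc.reverse ++ (cur.reverse ++ (mySplit l).headD []) :: (mySplit l).tail := by
  intro fuel
  induction fuel with
  | zero => intro l cur acc h; omega
  | succ f ih =>
    intro l cur acc h
    cases l with
    | nil => simp [PySem.Chars.splitOn.go, mySplit]
    | cons c rest =>
      by_cases hc : c = ' '
      · subst hc
        have : ([' '] : List Char).isPrefixOf (' ' :: rest) = true := by
          simp [List.isPrefixOf]
        rw [PySem.Chars.splitOn.go]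
        simp only [this, if_pos, List.length_cons, List.drop_succ_cons, List.length_nil, List.drop_zero]
        rw [ih rest [] (List.reverse cur :: acc) (by simpa using Nat.lt_of_succ_lt_succ h)]
        have hne := mySplit_ne_nil rest
        cases hm : mySplit rest with
        | nil => exact absurd hm hne
        | cons p ps => simp [mySplit, hm]
      · have hpre : ([' '] : List Char).isPrefixOf (c :: rest) = false := by
          simp [List.isPrefixOf]
          intro h'; exact absurd h'.symm hc
        rw [PySem.Chars.splitOn.go]
        simp only [hpre, Bool.false_eq_true, if_false]
        rw [ih rest (c :: cur) acc (by simpa using Nat.lt_of_succ_lt_succ h)]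
        have hne := mySplit_ne_nil rest
        cases hm : mySplit rest with
        | nil => exact absurd hm hne
        | cons p ps => simp [mySplit, hc, hm]

lemma splitOn_eq_mySplit (cs : List Char) :
    PySem.Chars.splitOn cs [' '] = mySplit cs := by
  unfold PySem.Chars.splitOn
  rw [splitOn_go_spec (cs.length + 1) cs [] [] (by omega)]
  have hne := mySplit_ne_nil cs
  cases hm : mySplit cs with
  | nil => exact absurd hm hne
  | cons p ps => simp

lemma mySplit_no_space (t : List Char) (h : ' ' ∉ t) : mySplit t = [t] := by
  induction t with
  | nil => simp [mySplit]
  | cons c rest ih =>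
    have hc : c ≠ ' ' := fun hc => h (by simp [hc])
    have hr : ' ' ∉ rest := fun hr => h (by simp [hr])
    simp [mySplit, hc, ih hr]

lemma mySplit_append_space (t cs : List Char) (h : ' ' ∉ t) :
    mySplit (t ++ ' ' :: cs) = t :: mySplit cs := by
  induction t with
  | nil => simp [mySplit]
  | cons c rest ih =>
    have hc : c ≠ ' ' := fun hc => h (by simp [hc])
    have hr : ' ' ∉ rest := fun hr => h (by simp [hr])
    simp [mySplit, hc, ih hr]

lemma rstrip_append_space (ys : List Char) :
    PySem.Chars.rstrip (ys ++ [' ']) = PySem.Chars.rstrip ys := by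
  simp [PySem.Chars.rstrip, PySem.Chars.isspace]

lemma strip_append_space (xs : List Char) :
    PySem.Chars.strip (xs ++ [' ']) = PySem.Chars.strip xs := by
  unfold PySem.Chars.strip PySem.Chars.lstrip
  rw [List.dropWhile_append]
  by_cases h : (xs.dropWhile PySem.Chars.isspace).isEmpty
  · simp [List.isEmpty_iff.mp h, List.dropWhile, PySem.Chars.isspace, PySem.Chars.rstrip]
  · simp only [h, if_false, Bool.false_eq_true]
    exact rstrip_append_space _

-- A's space-branch is exactly one B-step
lemma stepA_space (trat : List Char) (b : List Char × List Char × List Char) :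
    pvStepA (trat, b) ' ' = ([], pvStepB b trat) := by
  obtain ⟨b30, b25, b20⟩ := b
  simp only [pvStepA, pvStepB, pvFlush, strip_append_space]
  by_cases hs : 1 < (PySem.Chars.strip trat).length
  · simp [hs, List.length_append]
  · simp [hs]

-- main loop invariant: A's fold over the characters = B's fold over the split parts
lemma main_inv : ∀ (cs trat : List Char) (b : List Char × List Char × List Char),
    ' ' ∉ trat →
    cs.foldl pvStepA (trat, b) =
      ((mySplit (trat ++ cs)).getLastD [],
       (mySplit (trat ++ cs)).dropLast.foldl pvStepB b) := by
  intro cs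
  induction cs with
  | nil =>
    intro trat b h
    simp [mySplit_no_space trat h]
  | cons c rest ih =>
    intro trat b h
    by_cases hc : c = ' '
    · subst hc
      rw [List.foldl_cons, stepA_space, ih [] (pvStepB b trat) (by simp),
          mySplit_append_space trat rest h]
      have hne := mySplit_ne_nil rest
      cases hm : mySplit rest with
      | nil => exact absurd hm hne
      | cons p ps => simp [hm]
    · have hstep : pvStepA (trat, b) c = (trat ++ [c], b) := by
        simp [pvStepA, hc]
      have h' : ' ' ∉ trat ++ [c] := by
        intro hm
        rcases List.mem_append.mp hm with hm | hm
        · exact h hm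
        · exact hc (List.mem_singleton.mp hm).symm
      rw [List.foldl_cons, hstep, ih (trat ++ [c]) b h']
      simp

lemma finalAB (ps : List (List Char)) :
    pvFinalA (ps.getLastD [], ps.dropLast.foldl pvStepB ([], [], [])) = pvFinalB ps := by
  simp [pvFinalA, pvFinalB, pvFlush]

-- ===== VERDICT (by name: the statement is the Claim_ definition above) =====
theorem corrige_nome_empreendimento_spec : Claim_equal_corrige_nome_empreendimento := by
  intro nome _
  show corrige_nome_empreendimento nome = corrige_nome_empreendimento_alt nome
  unfold corrige_nome_empreendimento corrige_nome_empreendimento_alt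
  have h := main_inv (pvPre nome) [] ([], [], []) (by simp)
  rw [List.nil_append] at h
  rw [splitOn_eq_mySplit, h, finalAB]
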